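-- pv_equiv track=rewrite | github.com/bakkerjangert/AoC_2025 | Day 10/Day 10.py | solve_min_presses_opt1
-- ===== SOURCE A (Python) =====
-- from functools import cache
--
-- def solve_min_presses_opt1(buttons, target):
--     n = len(target)
--
--     @cache
--     def recurse(idx, current_tuple):
--         current = list(current_tuple)
--
--         # Basisgeval
--         if idx >= len(buttons):
--             return [] if current == target else None
--
--         # Pruning: overschrijding
--         if any(c > t for c, t in zip(current, target)):
--             return None
--
--         button = buttons[idx]
--         diffs = [target[i] - current[i] for i in button]
--         possible_presses = [d for d in diffs if d > 0]
--         max_presses = min(possible_presses) if possible_presses else 0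
--
--         # Probeer aftellend
--         for presses in range(max_presses, -1, -1):
--             new_current = current[:]
--             for i in button:
--                 new_current[i] += presses
--
--             # Pruning: overschrijding
--             if any(new_current[i] > target[i] for i in button):
--                 continue
--
--             result = recurse(idx + 1, tuple(new_current))
--             if result is not None:
--                 return [presses] + result
--
--         return None
--
--     return recurse(0, tuple([0] * n))
-- ===== SOURCE B (Python) =====
-- # Iterative explicit-stack DFS replacing A's memoized recursion; return value only.
-- def solve_min_presses_opt1(buttons, target):
--     n = len(target)
--     stack = [(0, [0] * n, [])]
--     while stack:
--         idx, current, path = stack.pop()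
--         if idx >= len(buttons):
--             if current == target:
--                 return path
--             continue
--         if any(c > t for c, t in zip(current, target)):
--             continue
--         button = buttons[idx]
--         diffs = [target[i] - current[i] for i in button]
--         possible = [d for d in diffs if d > 0]
--         max_presses = min(possible) if possible else 0
--         # push in increasing order so the highest press count is explored first
--         for presses in range(0, max_presses + 1):
--             new_current = current[:]
--             for i in button:
--                 new_current[i] += presses
--             if any(new_current[i] > target[i] for i in button):
--                 continue
--             stack.append((idx + 1, new_current, path + [presses]))
--     return None
-- ===== Notes on version B (the rewrite author's own statement) =====
-- stated objective: alternative
-- what changed: Replaces A's memoized recursion by an iterative depth-first search with an explicit stack of (idx, current, path) frames, pushing children in increasing press order so the highest-press branch is popped first and the first accepted frame's accumulated path is returned.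
import Mathlib
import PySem

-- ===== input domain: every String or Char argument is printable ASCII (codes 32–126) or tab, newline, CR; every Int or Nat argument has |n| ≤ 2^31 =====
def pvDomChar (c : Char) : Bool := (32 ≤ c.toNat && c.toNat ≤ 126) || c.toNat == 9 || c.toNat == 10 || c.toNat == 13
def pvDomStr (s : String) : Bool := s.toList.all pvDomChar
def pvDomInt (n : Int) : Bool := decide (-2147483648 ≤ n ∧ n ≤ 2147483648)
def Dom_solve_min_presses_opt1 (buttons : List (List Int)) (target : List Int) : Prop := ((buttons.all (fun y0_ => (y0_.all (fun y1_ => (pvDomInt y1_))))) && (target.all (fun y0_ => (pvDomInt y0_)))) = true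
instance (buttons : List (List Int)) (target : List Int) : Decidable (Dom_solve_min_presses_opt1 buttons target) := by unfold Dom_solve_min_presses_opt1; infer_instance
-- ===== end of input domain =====

-- B replaces A's memoized recursion by an iterative explicit-stack DFS carrying
-- (idx, current, path) frames (alternative decomposition; same cost).


-- ===== PORT A =====
-- shared transliterations of expressions that appear verbatim in BOTH Pythons:
-- max_presses = min([d for d in [target[i]-current[i] for i in button] if d > 0] or [0])
def pvMaxP (target current button : List Int) : Int :=
  let diffs := button.map (fun i => PySem.List.pyGetD target i 0 - PySem.List.pyGetD current i 0)
  let possible := diffs.filter (fun d => decide (0 < d))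
  match PySem.List.min? possible (fun d => d) with
  | some m => m
  | none => 0
-- new_current = current[:]; for i in button: new_current[i] += presses
def pvApply (current button : List Int) (presses : Int) : List Int :=
  button.foldl (fun c i => PySem.List.pySetD c i (PySem.List.pyGetD c i 0 + presses)) current
-- any(new_current[i] > target[i] for i in button)
def pvOver (target button nc : List Int) : Bool :=
  button.any (fun i => decide (PySem.List.pyGetD target i 0 < PySem.List.pyGetD nc i 0))

-- literal transliteration of A's recurse(idx, current); the @cache is dropped (speed only)
def pvRecurseA (buttons : List (List Int)) (target : List Int) (idx : Nat) (current : List Int) : Option (List Int) :=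
  if h : buttons.length ≤ idx then
    if current = target then some [] else none
  else if (current.zip target).any (fun ct => decide (ct.2 < ct.1)) then none
  else
    let button := buttons[idx]'(Nat.lt_of_not_le h)
    (PySem.List.pyRange (pvMaxP target current button) (-1) (-1)).findSome? (fun presses =>
      let nc := pvApply current button presses
      if pvOver target button nc then none
      else (pvRecurseA buttons target (idx + 1) nc).map (fun r => presses :: r))
termination_by buttons.length - idx
decreasing_by exact Nat.sub_succ_lt_self _ _ (Nat.lt_of_not_le h)

def solve_min_presses_opt1 (buttons : List (List Int)) (target : List Int) : Option (List Int) :=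
  pvRecurseA buttons target 0 (List.replicate target.length 0)

-- ===== PORT B =====
-- fuel bound for the stack loop: size of the search tree below a frame
-- (structural recursion on the remaining-buttons suffix)
def pvWeightL (target : List Int) : List (List Int) → List Int → Nat
  | [], _current => 1
  | btn :: more, current =>
    1 + ((PySem.List.pyRange 0 (pvMaxP target current btn + 1) 1).map (fun p =>
      pvWeightL target more (pvApply current btn p))).sum

-- the frames pushed for presses = 0..max_presses (inner pruning applied);
-- Python appends them in this order, so the reversed list sits on top of the stack
def pvChildren (idx : Nat) (target button current path : List Int) :
    List (Nat × List Int × List Int) :=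
  (PySem.List.pyRange 0 (pvMaxP target current button + 1) 1).filterMap (fun presses =>
    let nc := pvApply current button presses
    if pvOver target button nc then none
    else some (idx + 1, nc, path ++ [presses]))

-- literal transliteration of B's while-loop (stack head = Python's stack top);
-- the fuel argument is only a totality guard: solve_min_presses_opt1_alt supplies
-- enough of it (the root's tree weight) for it never to run out
def pvLoopB (buttons : List (List Int)) (target : List Int) :
    Nat → List (Nat × List Int × List Int) → Option (List Int)
  | _, [] => none
  | 0, _ :: _ => none
  | fuel + 1, (idx, current, path) :: rest =>
    if h : buttons.length ≤ idx then
      if current = target then some path else pvLoopB buttons target fuel rest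
    else if (current.zip target).any (fun ct => decide (ct.2 < ct.1)) then
      pvLoopB buttons target fuel rest
    else
      pvLoopB buttons target fuel
        ((pvChildren idx target (buttons[idx]'(Nat.lt_of_not_le h)) current path).reverse ++ rest)

def solve_min_presses_opt1_alt (buttons : List (List Int)) (target : List Int) : Option (List Int) :=
  pvLoopB buttons target (pvWeightL target buttons (List.replicate target.length 0))
    [(0, List.replicate target.length 0, [])]

-- ===== PRECONDITION & SPEC =====
-- Pre_ excludes exactly the inputs on which the Python (A and B alike) raises IndexError:
-- a button index out of range for target while no target entry is negative (a negative
-- target entry makes both return before any button index is touched).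
def Pre_solve_min_presses_opt1 (buttons : List (List Int)) (target : List Int) : Prop :=
  (∃ t ∈ target, t < 0) ∨ ∀ btn ∈ buttons, ∀ i ∈ btn, PySem.Raise.InRange target.length i
instance (buttons : List (List Int)) (target : List Int) : Decidable (Pre_solve_min_presses_opt1 buttons target) := by
  unfold Pre_solve_min_presses_opt1; infer_instance

def pvWitness_solve_min_presses_opt1 : List (List Int) × List Int := ([[0], [0, 1]], [2, 1])

def Spec_solve_min_presses_opt1 (buttons : List (List Int)) (target : List Int) (out : Option (List Int)) : Prop := out = solve_min_presses_opt1_alt buttons target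
instance (buttons : List (List Int)) (target : List Int) (out : Option (List Int)) : Decidable (Spec_solve_min_presses_opt1 buttons target out) := by unfold Spec_solve_min_presses_opt1; infer_instance

-- ===== CLAIM (what is proved, stated in full; the proofs are below) =====
def Claim_equal_solve_min_presses_opt1 : Prop := ∀ (buttons : List (List Int)) (target : List Int), Dom_solve_min_presses_opt1 buttons target → Pre_solve_min_presses_opt1 buttons target → Spec_solve_min_presses_opt1 buttons target (solve_min_presses_opt1 buttons target)

-- ===== LEMMAS AND PROOFS =====

theorem pvWeightL_pos (target : List Int) (rest : List (List Int)) (current : List Int) :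
    0 < pvWeightL target rest current := by
  cases rest <;> simp [pvWeightL]

theorem pv_sum_filterMap_le {α β : Type} (l : List α) (g : α → Option β) (w : β → Nat) (w' : α → Nat)
    (h : ∀ a b, g a = some b → w b ≤ w' a) :
    ((l.filterMap g).map w).sum ≤ (l.map w').sum := by
  induction l with
  | nil => simp
  | cons a l ih =>
    cases hg : g a with
    | none =>
      simp only [List.filterMap_cons, hg, List.map_cons, List.sum_cons]
      omega
    | some b =>
      simp only [List.filterMap_cons, hg, List.map_cons, List.sum_cons]
      have := h a b hg
      omega

theorem pvChildren_weight_lt (buttons : List (List Int)) (target : List Int) (idx : Nat)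
    (h : idx < buttons.length) (current path : List Int) :
    ((pvChildren idx target (buttons[idx]'h) current path).map
        (fun f => pvWeightL target (buttons.drop f.1) f.2.1)).sum
      < pvWeightL target (buttons.drop idx) current := by
  have hle := pv_sum_filterMap_le
    (PySem.List.pyRange 0 (pvMaxP target current (buttons[idx]'h) + 1) 1)
    (fun presses =>
      let nc := pvApply current (buttons[idx]'h) presses
      if pvOver target (buttons[idx]'h) nc then none
      else some (idx + 1, nc, path ++ [presses]))
    (fun f => pvWeightL target (buttons.drop f.1) f.2.1)
    (fun p => pvWeightL target (buttons.drop (idx + 1)) (pvApply current (buttons[idx]'h) p))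
    (by
      intro a b hg
      simp only at hg
      split at hg
      · exact absurd hg (by simp)
      · cases hg; exact le_refl _)
  rw [pvChildren]
  rw [← List.getElem_cons_drop h, pvWeightL]
  simp only at hle ⊢
  omega

theorem pv_findSome?_filterMap {α β γ : Type} (l : List α) (g : α → Option β) (F : β → Option γ) :
    (l.filterMap g).findSome? F = l.findSome? (fun a => (g a).bind F) := by
  induction l with
  | nil => rfl
  | cons a l ih =>
    simp only [List.filterMap_cons]
    cases hg : g a with
    | none => simp [hg, ih]
    | some b =>
      simp only [List.findSome?_cons, hg, Option.bind_some]
      cases F b with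
      | none => exact ih
      | some c => rfl

theorem pv_map_findSome? {α β γ : Type} (l : List α) (F : α → Option β) (h : β → γ) :
    (l.findSome? F).map h = l.findSome? (fun a => (F a).map h) := by
  induction l with
  | nil => rfl
  | cons a l ih =>
    simp only [List.findSome?_cons]
    cases F a <;> simp [ih]

theorem pv_findSome?_congr {α β : Type} {l : List α} {f g : α → Option β}
    (h : ∀ a ∈ l, f a = g a) : l.findSome? f = l.findSome? g := by
  induction l with
  | nil => rfl
  | cons a l ih =>
    simp only [List.findSome?_cons, h a (by simp)]
    cases g a with
    | none => exact ih (fun a ha => h a (by simp [ha]))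
    | some b => rfl

-- with enough fuel, the stack loop computes, frame by frame, A's recursion with
-- the frame's path prefixed
theorem pv_loop_eq (buttons : List (List Int)) (target : List Int) :
    ∀ (m : Nat) (stack : List (Nat × List Int × List Int)),
      (stack.map (fun f => pvWeightL target (buttons.drop f.1) f.2.1)).sum ≤ m →
      pvLoopB buttons target m stack
        = stack.findSome? (fun f => (pvRecurseA buttons target f.1 f.2.1).map (fun r => f.2.2 ++ r)) := by
  intro m
  induction m with
  | zero =>
    intro stack hm
    cases stack with
    | nil => rfl
    | cons f rest =>
      exfalso
      have := pvWeightL_pos target (buttons.drop f.1) f.2.1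
      simp at hm
      omega
  | succ m ih =>
    intro stack hm
    cases stack with
    | nil => rfl
    | cons f rest =>
      obtain ⟨idx, current, path⟩ := f
      simp only [List.map_cons, List.sum_cons] at hm
      have hw := pvWeightL_pos target (buttons.drop idx) current
      rw [pvLoopB, List.findSome?_cons]
      by_cases h : buttons.length ≤ idx
      · rw [dif_pos h, pvRecurseA, dif_pos h]
        by_cases hct : current = target
        · simp [hct]
        · simp only [if_neg hct, Option.map_none]
          exact ih rest (by omega)
      · rw [dif_neg h]
        by_cases hpr : (current.zip target).any (fun ct => decide (ct.2 < ct.1)) = true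
        · rw [if_pos hpr, pvRecurseA, dif_neg h, if_pos hpr]
          simp only [Option.map_none]
          exact ih rest (by omega)
        · rw [if_neg hpr]
          have hlt : idx < buttons.length := Nat.lt_of_not_le h
          have hchild := pvChildren_weight_lt buttons target idx hlt current path
          have hsum : (((pvChildren idx target (buttons[idx]'hlt) current path).reverse
              ++ rest).map (fun f => pvWeightL target (buttons.drop f.1) f.2.1)).sum ≤ m := by
            simp only [List.map_append, List.sum_append, List.map_reverse, List.sum_reverse]
            omega
          rw [ih _ hsum, List.findSome?_append]
          -- head value: findSome? over the reversed children equals A's branch scan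
          have hhead : (pvChildren idx target (buttons[idx]'hlt) current path).reverse.findSome?
                (fun f => (pvRecurseA buttons target f.1 f.2.1).map (fun r => f.2.2 ++ r))
              = (pvRecurseA buttons target idx current).map (fun r => path ++ r) := by
            rw [pvRecurseA, dif_neg h, if_neg hpr]
            rw [pv_map_findSome?]
            rw [pvChildren, ← List.filterMap_reverse]
            rw [pv_findSome?_filterMap]
            have hrev : (PySem.List.pyRange 0 (pvMaxP target current (buttons[idx]'hlt) + 1) 1).reverse
                = PySem.List.pyRange (pvMaxP target current (buttons[idx]'hlt)) (-1) (-1) := by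
              rw [PySem.List.pyRange_neg_one_eq_reverse]
              norm_num
            rw [hrev]
            apply pv_findSome?_congr
            intro presses _
            simp only
            by_cases hov : pvOver target (buttons[idx]'hlt) (pvApply current (buttons[idx]'hlt) presses) = true
            · simp [hov]
            · simp only [if_neg hov, Option.bind]
              cases pvRecurseA buttons target (idx + 1) (pvApply current (buttons[idx]'hlt) presses) with
              | none => simp
              | some r => simp
          rw [hhead]
          cases (pvRecurseA buttons target idx current).map (fun r => path ++ r) <;> simp

-- ===== VERDICT (by name: the statement is the Claim_ definition above) =====
theorem solve_min_presses_opt1_spec : Claim_equal_solve_min_presses_opt1 := by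
  intro buttons target _ _
  unfold Spec_solve_min_presses_opt1 solve_min_presses_opt1 solve_min_presses_opt1_alt
  rw [pv_loop_eq buttons target _ _ (by simp)]
  simp [List.findSome?_cons]
  cases pvRecurseA buttons target 0 (List.replicate target.length 0) <;> simp
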